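-- pv_equiv track=rewrite | github.com/mtrejo0/SchoolWork | 6.009/past/quiz2 April/quiz2/quiz.py | correctLineage
-- ===== SOURCE A (Python) =====
-- def correctLineage(lin):
--     if(len(lin)<2):
--         # default this will always be true
--         return True
--
--     # remember first value
--     curr = lin[0]
--     i = 0
--
--     while(i<len(lin)):
--
--         if(i == len(lin) - 1 and lin[i] == curr):
--             # if we are at the end of the list and the value
--             # has correct value then its a correct lineage
--             return True
--
--         if(lin[i] == curr and lin[i+1] == curr):
--             # if consecutive values have the same value then
--             # this part of the tree is valid
--
--             # flip the value
--             if(curr == "black"):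
--                 curr = "blue"
--             else:
--                 curr = "black"
--             # skip ahead 2
--             i+=2
--         else:
--             return False
--     return True
-- ===== SOURCE B (Python) =====
-- def correctLineage(lin):
--     if len(lin) < 2:
--         return True
--     expected = []
--     curr = lin[0]
--     while len(expected) < len(lin):
--         expected.append(curr)
--         expected.append(curr)
--         curr = "blue" if curr == "black" else "black"
--     return list(lin) == expected[:len(lin)]
-- ===== Notes on version B (the rewrite author's own statement) =====
-- stated objective: alternative
-- what changed: B precomputes the one deterministic expected pattern (each colour written twice, flipping black<->blue, seeded by lin[0]) and returns a single list comparison, replacing A's streaming index-stepping validation with early returns.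
import Mathlib
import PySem

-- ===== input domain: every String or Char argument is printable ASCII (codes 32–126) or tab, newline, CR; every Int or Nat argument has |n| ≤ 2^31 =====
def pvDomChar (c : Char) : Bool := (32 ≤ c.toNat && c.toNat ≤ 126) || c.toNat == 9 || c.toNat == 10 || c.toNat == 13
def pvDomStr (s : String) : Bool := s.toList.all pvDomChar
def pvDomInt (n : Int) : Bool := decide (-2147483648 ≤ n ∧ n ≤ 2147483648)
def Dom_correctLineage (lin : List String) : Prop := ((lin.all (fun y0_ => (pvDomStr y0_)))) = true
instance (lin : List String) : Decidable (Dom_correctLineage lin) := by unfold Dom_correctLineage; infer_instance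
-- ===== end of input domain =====

-- B builds the expected pattern once and compares; A validates on the fly stepping by 2 (alternative decomposition, same cost).

-- ===== PORT A =====
-- A's while loop: i steps by 2, curr flips; lin[i]/lin[i+1] are read only in
-- branches where Python's guards keep them in range (lin[i+1] is short-circuit
-- protected), so getD here is exact.
def correctLineage_loop (lin : List String) (curr : String) (i : Nat) : Bool :=
  if i < lin.length then
    if i == lin.length - 1 && lin.getD i "" == curr then
      true
    else if lin.getD i "" == curr && lin.getD (i+1) "" == curr then
      correctLineage_loop lin (if curr == "black" then "blue" else "black") (i+2)
    else
      false
  else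
    true
termination_by lin.length - i
decreasing_by omega

def correctLineage (lin : List String) : Bool :=
  if lin.length < 2 then true
  else correctLineage_loop lin (lin.getD 0 "") 0

-- ===== PORT B =====
-- B's while loop: append curr twice and flip until the built list is long enough.
def correctLineage_alt_build (n : Nat) (curr : String) (expected : List String) : List String :=
  if expected.length < n then
    correctLineage_alt_build n (if curr == "black" then "blue" else "black")
      (expected ++ [curr, curr])
  else
    expected
termination_by n - expected.length
decreasing_by simp; omega

def correctLineage_alt (lin : List String) : Bool :=
  if lin.length < 2 then true
  else lin == (correctLineage_alt_build lin.length (lin.getD 0 "") []).take lin.length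

-- ===== PRECONDITION & SPEC =====
def Spec_correctLineage (lin : List String) (out : Bool) : Prop := out = correctLineage_alt lin
instance (lin : List String) (out : Bool) : Decidable (Spec_correctLineage lin out) := by unfold Spec_correctLineage; infer_instance

-- ===== CLAIM (what is proved, stated in full; the proofs are below) =====
def Claim_equal_correctLineage : Prop := ∀ (lin : List String), Dom_correctLineage lin → Spec_correctLineage lin (correctLineage lin)

-- ===== LEMMAS AND PROOFS =====

-- The abstract pattern: m pairs, flipping after each pair.
def pvPat (curr : String) (m : Nat) : List String :=
  match m with
  | 0 => []
  | m+1 => curr :: curr :: pvPat (if curr == "black" then "blue" else "black") m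

theorem pvPat_take_eq (curr : String) (m m' k : Nat) (h : k ≤ 2 * m) (h' : k ≤ 2 * m') :
    (pvPat curr m).take k = (pvPat curr m').take k := by
  induction m generalizing curr m' k with
  | zero =>
    interval_cases k
    simp
  | succ m ih =>
    match m', k with
    | _, 0 => simp
    | 0, k+1 => omega
    | m'+1, 1 => simp [pvPat]
    | m'+1, (k+2) =>
      simp only [pvPat, List.take_succ_cons]
      rw [ih _ m' k (by omega) (by omega)]

theorem build_eq_pat (n : Nat) : ∀ (t : Nat) (curr : String) (acc : List String),
    n - acc.length = t → correctLineage_alt_build n curr acc = acc ++ pvPat curr ((t + 1) / 2) := by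
  intro t
  induction t using Nat.strong_induction_on with
  | _ t ih =>
    intro curr acc h
    rw [correctLineage_alt_build]
    by_cases hl : acc.length < n
    · simp only [if_pos hl]
      rcases t with _ | t
      · omega
      rcases t with _ | t
      · -- one element still missing: one more iteration, then done
        rw [correctLineage_alt_build]
        simp only [List.length_append]
        have : ¬ (acc.length + 2 < n) := by omega
        simp [this, pvPat]
      · rw [ih t (by omega) _ (acc ++ [curr, curr]) (by simp; omega)]
        have h2 : (t + 2 + 1) / 2 = (t + 1) / 2 + 1 := by omega
        simp [h2, pvPat]
    · simp only [if_neg hl]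
      have : t = 0 := by omega
      simp [this, pvPat]

-- A's loop decides whether the suffix from i equals the pattern prefix.
theorem loop_eq_pat (lin : List String) : ∀ (k i : Nat) (curr : String),
    lin.length - i = k →
    correctLineage_loop lin curr i = (lin.drop i == (pvPat curr lin.length).take k) := by
  intro k
  induction k using Nat.strong_induction_on with
  | _ k ih =>
    intro i curr hk
    rw [correctLineage_loop]
    by_cases hi : i < lin.length
    · simp only [if_pos hi]
      have hget : lin.getD i "" = lin[i]'hi := List.getD_eq_getElem _ _ hi
      have hdrop : lin.drop i = lin[i]'hi :: lin.drop (i+1) := List.drop_eq_getElem_cons hi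
      rcases k with _ | k
      · omega
      have hMpos : ∃ M, lin.length = M + 1 := ⟨lin.length - 1, by omega⟩
      obtain ⟨M, hM⟩ := hMpos
      rcases k with _ | k
      · -- last element
        have hlast : (i == lin.length - 1) = true := by simp; omega
        have hdrop1 : lin.drop (i+1) = [] := by
          apply List.drop_eq_nil_of_le; omega
        rw [hlast]
        simp only [Bool.true_and, hget, hM, pvPat, List.take_succ_cons, List.take_zero]
        by_cases he : lin[i]'hi = curr
        · have hb : (lin[i]'hi == curr) = true := by simp [he]
          rw [hb, if_pos rfl]
          symm
          rw [beq_iff_eq, hdrop, hdrop1, he]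
        · have hb : (lin[i]'hi == curr) = false := by simp [he]
          rw [hb]
          simp only [Bool.false_eq_true, if_false, Bool.false_and]
          symm
          rw [beq_eq_false_iff_ne, hdrop, hdrop1]
          intro hc
          injection hc with h1 _
          exact he h1
      · -- at least two elements remain
        have hne : (i == lin.length - 1) = false := by simp; omega
        have hi1 : i + 1 < lin.length := by omega
        have hget1 : lin.getD (i+1) "" = lin[i+1]'hi1 := List.getD_eq_getElem _ _ hi1
        have hdrop1 : lin.drop (i+1) = lin[i+1]'hi1 :: lin.drop (i+2) :=
          List.drop_eq_getElem_cons hi1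
        simp only [hne, Bool.false_and, Bool.false_eq_true, if_false, hget, hget1]
        have hexp : (pvPat curr lin.length).take (k+1+1)
            = curr :: curr :: (pvPat (if curr == "black" then "blue" else "black") M).take k := by
          rw [hM]
          simp only [pvPat, List.take_succ_cons]
        by_cases h0 : lin[i]'hi = curr
        · by_cases h1 : lin[i+1]'hi1 = curr
          · have hb : (lin[i]'hi == curr && lin[i+1]'hi1 == curr) = true := by
              simp [h0, h1]
            rw [hb, if_pos rfl]
            rw [ih k (by omega) (i+2) _ (by omega)]
            rw [hexp, hdrop, hdrop1, h0, h1]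
            have hpt := pvPat_take_eq (if curr == "black" then "blue" else "black") (M+1) M
              k (by omega) (by omega)
            rw [← hM] at hpt
            rw [hpt]
            simp
          · have hb : (lin[i]'hi == curr && lin[i+1]'hi1 == curr) = false := by
              simp [h1]
            rw [hb]
            simp only [Bool.false_eq_true, if_false]
            symm
            rw [beq_eq_false_iff_ne, hexp, hdrop, hdrop1]
            intro hc
            injection hc with _ hc1
            injection hc1 with hc2 _
            exact h1 hc2
        · have hb : (lin[i]'hi == curr && lin[i+1]'hi1 == curr) = false := by
            simp [h0]
          rw [hb]
          simp only [Bool.false_eq_true, if_false]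
          symm
          rw [beq_eq_false_iff_ne, hexp, hdrop]
          intro hc
          injection hc with hc1 _
          exact h0 hc1
    · simp only [if_neg hi]
      have hk0 : k = 0 := by omega
      have : lin.drop i = [] := List.drop_eq_nil_of_le (by omega)
      simp [hk0, this]

-- ===== VERDICT (by name: the statement is the Claim_ definition above) =====
theorem correctLineage_spec : Claim_equal_correctLineage := by
  intro lin _
  unfold Spec_correctLineage correctLineage correctLineage_alt
  by_cases h : lin.length < 2
  · simp [h]
  · simp only [if_neg h]
    rw [loop_eq_pat lin lin.length 0 _ (by omega)]
    rw [build_eq_pat lin.length (lin.length) _ [] (by simp)]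
    simp only [List.nil_append, List.drop_zero]
    rw [pvPat_take_eq _ lin.length ((lin.length + 1) / 2) lin.length (by omega) (by omega)]
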